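-- pv_equiv track=rewrite | github.com/Master-Computer-Science-Program/green-lab-project-nndev | benchmarks/G19/C8/guideline.py | bin_to_decimal
-- ===== SOURCE A (Python) =====
-- def bin_to_decimal(bin_string: str) -> int:
--     """
--     Convert a binary value to its decimal equivalent
--
--     >>> bin_to_decimal("101")
--     5
--     >>> bin_to_decimal(" 1010   ")
--     10
--     >>> bin_to_decimal("-11101")
--     -29
--     >>> bin_to_decimal("0")
--     0
--     >>> bin_to_decimal("a")
--     Traceback (most recent call last):
--         ...
--     ValueError: Non-binary value was passed to the function
--     >>> bin_to_decimal("")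
--     Traceback (most recent call last):
--         ...
--     ValueError: Empty string was passed to the function
--     >>> bin_to_decimal("39")
--     Traceback (most recent call last):
--         ...
--     ValueError: Non-binary value was passed to the function
--     """
--     neg_flag=0
--     bin_string = str(bin_string).strip()
--     if not bin_string:
--         raise ValueError("Empty string was passed to the function")
--     if bin_string[0] == "-":
--         bin_string = bin_string[1:]
--         neg_flag=1
--     if not all(char in "01" for char in bin_string):
--         raise ValueError("Non-binary value was passed to the function")
--     decimal_number = 0
--     for char in bin_string:
--         decimal_number = 2 * decimal_number + int(char)
--     return -decimal_number if neg_flag else decimal_number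
-- ===== SOURCE B (Python) =====
-- def bin_to_decimal(bin_string: str) -> int:
--     s = str(bin_string).strip()
--     if not s:
--         raise ValueError("Empty string was passed to the function")
--     neg = s.startswith("-")
--     digits = s[1:] if neg else s
--     if set(digits) - set("01"):
--         raise ValueError("Non-binary value was passed to the function")
--     n = len(digits)
--     magnitude = sum(1 << (n - 1 - i) for i, c in enumerate(digits) if c == "1")
--     return -magnitude if neg else magnitude
-- ===== Notes on version B (the rewrite author's own statement) =====
-- stated objective: alternative
-- what changed: A's MSB-first Horner accumulation (decimal = 2*decimal + int(char)) is replaced by a positional-weight sum: each set bit at index i contributes 2^(n-1-i) via an enumerate-based comprehension, and the digit validation is done by set difference instead of a per-char all() scan.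
import Mathlib
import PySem

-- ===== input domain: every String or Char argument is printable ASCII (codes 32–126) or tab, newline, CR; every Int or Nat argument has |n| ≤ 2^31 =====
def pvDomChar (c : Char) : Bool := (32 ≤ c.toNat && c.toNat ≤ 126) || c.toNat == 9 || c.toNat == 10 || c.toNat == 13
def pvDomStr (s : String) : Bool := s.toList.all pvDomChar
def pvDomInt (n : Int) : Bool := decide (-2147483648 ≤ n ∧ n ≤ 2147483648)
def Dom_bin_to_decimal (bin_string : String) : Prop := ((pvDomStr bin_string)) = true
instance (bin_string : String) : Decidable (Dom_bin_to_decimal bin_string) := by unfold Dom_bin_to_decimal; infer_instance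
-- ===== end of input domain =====

-- B replaces A's MSB-first Horner loop by a positional-weight sum (each '1' at index i contributes 2^(n-1-i)) and the all()-scan validation by a set difference; same cost, different decomposition.

-- ===== PORT A =====
-- A: strip, empty check (raise), sign via s[0]=='-', all(char in "01") check (raise), Horner loop 2*d + int(char).
def bin_to_decimal (bin_string : String) : Int :=
  let s0 := PySem.Chars.strip bin_string.toList
  if s0 = [] then 0   -- ValueError in Python; excluded by Pre_
  else
    let s := if s0.head? = some '-' then s0.drop 1 else s0
    if !(s.all fun c => c == '0' || c == '1') then 0   -- ValueError in Python; excluded by Pre_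
    else
      let d := s.foldl (fun d c => 2 * d + (if c == '1' then (1 : Int) else 0)) 0
      if s0.head? = some '-' then -d else d

-- ===== PORT B =====
-- B: strip, empty check, sign via startswith, set-difference validation, then sum of 2^(n-1-i) over enumerated '1' bits.
def bin_to_decimal_alt (bin_string : String) : Int :=
  let s := PySem.Chars.strip bin_string.toList
  if s = [] then 0   -- ValueError in Python; excluded by Pre_
  else
    let neg := PySem.Chars.startswith s ['-']
    let digits := if neg then s.drop 1 else s
    if PySem.Set.diff (PySem.Set.ofList digits) (PySem.Set.ofList ['0', '1']) ≠ [] then 0   -- ValueError in Python; excluded by Pre_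
    else
      let n : Int := digits.length
      let magnitude :=
        (((PySem.List.enumerate digits).filter (fun p => p.2 == '1')).map
          (fun p => (2 : Int) ^ (n - 1 - p.1).toNat)).sum
      if neg then -magnitude else magnitude

-- ===== PRECONDITION & SPEC =====
-- Pre_ excludes exactly the inputs on which A raises ValueError: empty after strip, or a non-binary character after the optional leading sign.
def Pre_bin_to_decimal (bin_string : String) : Prop :=
  let s0 := PySem.Chars.strip bin_string.toList
  s0 ≠ [] ∧ ((if s0.head? = some '-' then s0.drop 1 else s0).all fun c => c == '0' || c == '1') = true
instance (bin_string : String) : Decidable (Pre_bin_to_decimal bin_string) := by unfold Pre_bin_to_decimal; infer_instance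
def pvWitness_bin_to_decimal : String := " -1011 "
def Spec_bin_to_decimal (bin_string : String) (out : Int) : Prop := out = bin_to_decimal_alt bin_string
instance (bin_string : String) (out : Int) : Decidable (Spec_bin_to_decimal bin_string out) := by unfold Spec_bin_to_decimal; infer_instance

-- ===== CLAIM (what is proved, stated in full; the proofs are below) =====
def Claim_equal_bin_to_decimal : Prop := ∀ (bin_string : String), Dom_bin_to_decimal bin_string → Pre_bin_to_decimal bin_string → Spec_bin_to_decimal bin_string (bin_to_decimal bin_string)

-- ===== LEMMAS AND PROOFS =====

-- B's positional sum of a digit list (exponent base n = length).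
def pvPosSum (l : List Char) : Int :=
  ((PySem.List.enumerate l).filter (fun p => p.2 == '1')).map
    (fun p => (2 : Int) ^ ((l.length : Int) - 1 - p.1).toNat) |>.sum

theorem pvPosSum_append (l : List Char) (c : Char) :
    pvPosSum (l ++ [c]) = 2 * pvPosSum l + (if c == '1' then (1 : Int) else 0) := by
  unfold pvPosSum
  simp only [PySem.List.enumerate_append, List.filter_append, List.map_append, List.sum_append,
    List.length_append, List.length_cons, List.length_nil]
  have h1 : (((PySem.List.enumerate l).filter (fun p => p.2 == '1')).map
      (fun p => (2 : Int) ^ (((l.length + 1 : Nat) : Int) - 1 - p.1).toNat)).sum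
      = 2 * (((PySem.List.enumerate l).filter (fun p => p.2 == '1')).map
      (fun p => (2 : Int) ^ ((l.length : Int) - 1 - p.1).toNat)).sum := by
    rw [← List.sum_map_mul_left]
    apply congrArg
    apply List.map_congr_left
    intro p hp
    have hp' := List.mem_of_mem_filter hp
    rw [PySem.List.mem_enumerate_iff] at hp'
    obtain ⟨k, hk, rfl⟩ := hp'
    have hmn : (((l.length + 1 : Nat) : Int) - 1 - (0 + (k : Int))).toNat
        = ((l.length : Int) - 1 - (0 + (k : Int))).toNat + 1 := by omega
    rw [hmn, pow_succ]
    ring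
  rw [h1]
  congr 1
  have he : ((l.length + 1 : Nat) : Int) - 1 - (0 + (l.length : Int)) = 0 := by omega
  simp only [PySem.List.enumerate_cons, PySem.List.enumerate_nil, Nat.cast_add, Nat.cast_one, zero_add, List.filter_cons, List.filter_nil]
  by_cases hc : (c == '1') = true
  · simp [hc]
  · simp [hc]

theorem pvHorner_eq_posSum (l : List Char) :
    l.foldl (fun d c => 2 * d + (if c == '1' then (1 : Int) else 0)) 0 = pvPosSum l := by
  induction l using List.reverseRecOn with
  | nil => simp [pvPosSum, PySem.List.enumerate]
  | append_singleton l c ih =>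
      rw [List.foldl_append, pvPosSum_append, List.foldl_cons, List.foldl_nil, ih]

-- A's sign test (head? = '-') coincides with B's startswith on a nonempty list.
theorem pvStarts_eq_head (s : List Char) (hs : s ≠ []) :
    PySem.Chars.startswith s ['-'] = decide (s.head? = some '-') := by
  cases s with
  | nil => exact absurd rfl hs
  | cons c t =>
      by_cases h : c = '-'
      · subst h
        simp [PySem.Chars.startswith, List.isPrefixOf]
      · have h1 : ('-' == c) = false := by simpa using (Ne.symm h)
        simp [PySem.Chars.startswith, List.isPrefixOf, h, h1]

-- B's set-difference emptiness coincides with A's all()-scan.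
theorem pvDiff_empty_iff (digits : List Char) :
    (PySem.Set.diff (PySem.Set.ofList digits) (PySem.Set.ofList ['0', '1']) = [])
      ↔ (digits.all fun c => c == '0' || c == '1') = true := by
  unfold PySem.Set.diff
  rw [List.filter_eq_nil_iff, List.all_eq_true]
  have hmem : ∀ c : Char, c ∈ PySem.Set.ofList ['0', '1'] ↔ (c = '0' ∨ c = '1') := by
    intro c
    rw [PySem.Set.mem_ofList]
    simp
  constructor
  · intro h c hc
    have ht := h c ((PySem.Set.mem_ofList digits c).mpr hc)
    have hm : c ∈ PySem.Set.ofList ['0', '1'] := by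
      by_contra hcon
      exact ht (by simp [PySem.Set.contains, hcon])
    rcases (hmem c).mp hm with h0 | h0 <;> simp [h0]
  · intro h c hc
    have ht := h c ((PySem.Set.mem_ofList digits c).mp hc)
    have hm : c ∈ PySem.Set.ofList ['0', '1'] := (hmem c).mpr (by
      simpa using ht)
    simp [PySem.Set.contains, hm]

-- ===== VERDICT (by name: the statement is the Claim_ definition above) =====
theorem bin_to_decimal_spec : Claim_equal_bin_to_decimal := by
  intro bin_string _ hpre
  obtain ⟨hne, hall⟩ := hpre
  unfold Spec_bin_to_decimal
  simp only [bin_to_decimal, bin_to_decimal_alt]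
  rw [pvStarts_eq_head _ hne]
  simp only [if_neg hne]
  by_cases hneg : (PySem.Chars.strip bin_string.toList).head? = some '-'
  · simp only [hneg, decide_true, if_true, List.drop_one] at hall ⊢
    rw [if_neg (by simp [hall]), if_neg (by simp [(pvDiff_empty_iff _).mpr hall]),
      pvHorner_eq_posSum]
    rfl
  · simp only [hneg, decide_false, Bool.false_eq_true, if_false, List.drop_one] at hall ⊢
    rw [if_neg (by simp [hall]), if_neg (by simp [(pvDiff_empty_iff _).mpr hall]),
      pvHorner_eq_posSum]
    rfl
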